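-- pv_equiv track=rewrite | github.com/scottmsilver/gmail-search | scripts/migrate_sqlite_to_pg.py | _resolve_tables
-- ===== SOURCE A (Python) =====
-- TABLES: list[str] = [
--     "messages",
--     "attachments",
--     "embeddings",
--     "message_summaries",
--     "thread_summary",
--     "topics",
--     "message_topics",
--     "contact_frequency",
--     "term_aliases",
--     "costs",
--     "sync_state",
--     "query_cache",
--     "conversations",
--     "conversation_messages",
--     "model_battles",
--     "job_progress",
--     "scann_index_pointer",
-- ]
--
-- def _resolve_tables(arg_value: str) -> list[str]:
--     if not arg_value:
--         return list(TABLES)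
--     requested = [t.strip() for t in arg_value.split(",") if t.strip()]
--     unknown = [t for t in requested if t not in TABLES]
--     if unknown:
--         raise SystemExit(f"unknown table(s): {unknown}  (known: {TABLES})")
--     # Preserve FK-safe order even when the user lists them out of order.
--     order = {t: i for i, t in enumerate(TABLES)}
--     return sorted(requested, key=lambda t: order[t])
-- ===== SOURCE B (Python) =====
-- TABLES: list[str] = [
--     "messages",
--     "attachments",
--     "embeddings",
--     "message_summaries",
--     "thread_summary",
--     "topics",
--     "message_topics",
--     "contact_frequency",
--     "term_aliases",
--     "costs",
--     "sync_state",
--     "query_cache",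
--     "conversations",
--     "conversation_messages",
--     "model_battles",
--     "job_progress",
--     "scann_index_pointer",
-- ]
--
-- def _resolve_tables(arg_value: str) -> list[str]:
--     if not arg_value:
--         return list(TABLES)
--     # One pass over the raw comma tokens: strip, drop empties, and classify each
--     # token in flight as known (counted) or unknown (collected) -- no intermediate
--     # `requested` list, no second validation pass, no sort.
--     counts: dict[str, int] = {}
--     bad: list[str] = []
--     for raw in arg_value.split(","):
--         t = raw.strip()
--         if not t:
--             continue
--         if t in TABLES:
--             counts[t] = counts.get(t, 0) + 1
--         else:
--             bad.append(t)
--     if bad: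
--         raise SystemExit(f"unknown table(s): {bad}  (known: {TABLES})")
--     out: list[str] = []
--     for table in TABLES:
--         out += [table] * counts.get(table, 0)
--     return out
-- ===== Notes on version B (the rewrite author's own statement) =====
-- stated objective: alternative
-- what changed: A builds a requested list, validates it in a second pass, and sorts it by a position-index dict; B makes one pass over the raw comma tokens that strips, drops empties and classifies each token as counted-known or collected-unknown in flight, then emits the result by scanning TABLES in its fixed order repeating each name by its count - no intermediate requested list and no sort.
import Mathlib
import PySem

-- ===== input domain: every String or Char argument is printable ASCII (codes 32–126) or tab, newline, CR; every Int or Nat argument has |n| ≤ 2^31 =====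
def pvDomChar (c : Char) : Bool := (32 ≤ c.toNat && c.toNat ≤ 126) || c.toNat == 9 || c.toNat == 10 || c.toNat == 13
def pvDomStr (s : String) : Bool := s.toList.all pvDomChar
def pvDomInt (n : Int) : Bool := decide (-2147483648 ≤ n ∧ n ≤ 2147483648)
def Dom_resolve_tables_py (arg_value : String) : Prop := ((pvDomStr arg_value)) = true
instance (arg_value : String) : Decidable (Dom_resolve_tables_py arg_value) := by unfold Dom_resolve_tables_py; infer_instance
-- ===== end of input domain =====

-- B replaces A's list-build + second validation pass + position-index sort by a single
-- classifying pass over the raw comma tokens (strip, drop empties, count known / collect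
-- unknown in flight) followed by one scan of TABLES in its fixed order (no speed claim);
-- on unknown-table inputs both Pythons raise SystemExit (outside Pre_; the ports return []).

-- ===== PORT A =====
def pvTables : List String := [
    "messages",
    "attachments",
    "embeddings",
    "message_summaries",
    "thread_summary",
    "topics",
    "message_topics",
    "contact_frequency",
    "term_aliases",
    "costs",
    "sync_state",
    "query_cache",
    "conversations",
    "conversation_messages",
    "model_battles",
    "job_progress",
    "scann_index_pointer"]

def resolve_tables_py (arg_value : String) : List String :=
  if arg_value = "" then pvTables
  else
    -- [t.strip() for t in arg_value.split(",") if t.strip()]  (sep "," ≠ "", so split? is some)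
    let requested := (((PySem.Str.split? arg_value ",").getD []).map PySem.Str.strip).filter (fun t => t ≠ "")
    let unknown := requested.filter (fun t => !pvTables.contains t)
    if unknown ≠ [] then []  -- Python: raise SystemExit (excluded by Pre_)
    else
      let order : PySem.Dict String Int :=
        (PySem.List.enumerate pvTables).foldl (fun d p => d.insert p.2 p.1) PySem.Dict.empty
      PySem.List.sorted requested (fun t => order.getD t 0) false

-- ===== PORT B =====
-- one classifying fold over the raw tokens: state = (counts dict, bad list)
def pvClassifyStep (st : PySem.Dict String Int × List String) (raw : String) :
    PySem.Dict String Int × List String :=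
  let t := PySem.Str.strip raw
  if t = "" then st
  else if pvTables.contains t then (st.1.insert t (st.1.getD t 0 + 1), st.2)
  else (st.1, st.2 ++ [t])

def resolve_tables_py_alt (arg_value : String) : List String :=
  if arg_value = "" then pvTables
  else
    let st := ((PySem.Str.split? arg_value ",").getD []).foldl pvClassifyStep
      (PySem.Dict.empty, [])
    if st.2 ≠ [] then []  -- Python: raise SystemExit (excluded by Pre_)
    else
      pvTables.foldl (fun out table => out ++ PySem.List.pyRepeat [table] (st.1.getD table 0)) []

-- ===== PRECONDITION & SPEC =====
-- Pre_ excludes exactly the inputs where some stripped comma-separated token is non-empty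
-- and not a known table name: there both Pythons raise SystemExit.
def Pre_resolve_tables_py (arg_value : String) : Prop :=
  ∀ t ∈ ((PySem.Str.split? arg_value ",").getD []).map PySem.Str.strip, t = "" ∨ t ∈ pvTables
instance (arg_value : String) : Decidable (Pre_resolve_tables_py arg_value) := by
  unfold Pre_resolve_tables_py; infer_instance
def pvWitness_resolve_tables_py : String := "topics,messages"

def Spec_resolve_tables_py (arg_value : String) (out : List String) : Prop := out = resolve_tables_py_alt arg_value
instance (arg_value : String) (out : List String) : Decidable (Spec_resolve_tables_py arg_value out) := by unfold Spec_resolve_tables_py; infer_instance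

-- ===== CLAIM (what is proved, stated in full; the proofs are below) =====
def Claim_equal_resolve_tables_py : Prop := ∀ (arg_value : String), Dom_resolve_tables_py arg_value → Pre_resolve_tables_py arg_value → Spec_resolve_tables_py arg_value (resolve_tables_py arg_value)

-- ===== LEMMAS AND PROOFS =====

-- the key A's sort uses: position of t in pvTables via the enumerate-built dict
def pvKey (t : String) : Int :=
  (((PySem.List.enumerate pvTables).foldl (fun d p => d.insert p.2 p.1)
      PySem.Dict.empty : PySem.Dict String Int)).getD t 0

lemma pvKey_strictMono : pvTables.Pairwise (fun a b => pvKey a < pvKey b) := by decide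

lemma pvKey_inj : ∀ a ∈ pvTables, ∀ b ∈ pvTables, pvKey a = pvKey b → a = b := by decide

lemma pvTables_nodup : pvTables.Nodup := by decide

-- B's classifying fold, unfolded: counts = counting fold over the kept stripped tokens,
-- bad = the unknown ones among them (appended to the initial bad list)
lemma pvClassify_fold (raw : List String) :
    ∀ (d : PySem.Dict String Int) (bad : List String),
      raw.foldl pvClassifyStep (d, bad)
        = ((((raw.map PySem.Str.strip).filter (fun t => t ≠ "")).filter
              (fun t => pvTables.contains t)).foldl
            (fun d t => d.insert t (d.getD t 0 + 1)) d,
           bad ++ ((raw.map PySem.Str.strip).filter (fun t => t ≠ "")).filter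
              (fun t => !pvTables.contains t)) := by
  induction raw with
  | nil => intro d bad; simp
  | cons r rest ih =>
    intro d bad
    rw [List.foldl_cons]
    by_cases he : PySem.Str.strip r = ""
    · have hstep : pvClassifyStep (d, bad) r = (d, bad) := by
        simp [pvClassifyStep, he]
      rw [hstep, ih]
      simp [he]
    · by_cases hk : PySem.Str.strip r ∈ pvTables
      · have hstep : pvClassifyStep (d, bad) r
            = (d.insert (PySem.Str.strip r) (d.getD (PySem.Str.strip r) 0 + 1), bad) := by
          simp [pvClassifyStep, he, hk]
        rw [hstep, ih]
        simp [List.contains_eq_mem, he, hk]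
      · have hstep : pvClassifyStep (d, bad) r = (d, bad ++ [PySem.Str.strip r]) := by
          simp [pvClassifyStep, he, hk]
        rw [hstep, ih]
        simp [List.contains_eq_mem, he, hk]

-- a permutation of strings that are pairwise ≤ under a key injective on their members is an equality
lemma pv_eq_of_perm (key : String → Int) :
    ∀ (l1 l2 : List String), l1.Perm l2 →
      l1.Pairwise (fun a b => key a ≤ key b) → l2.Pairwise (fun a b => key a ≤ key b) →
      (∀ a ∈ l1, ∀ b ∈ l1, key a = key b → a = b) → l1 = l2 := by
  intro l1
  induction l1 with
  | nil => intro l2 h _ _ _; exact (h.nil_eq).symm ▸ rfl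
  | cons a t1 ih =>
    intro l2 h h1 h2 hinj
    cases l2 with
    | nil => exact absurd h.symm.nil_eq (by simp)
    | cons b t2 =>
      have hb1 : b ∈ a :: t1 := h.symm.subset (by simp)
      have hab : key a ≤ key b := by
        rcases List.mem_cons.mp hb1 with hba | hbt
        · exact le_of_eq (by rw [hba])
        · exact (List.pairwise_cons.mp h1).1 b hbt
      have ha2 : a ∈ b :: t2 := h.subset (by simp)
      have hba : key b ≤ key a := by
        rcases List.mem_cons.mp ha2 with hab' | hat
        · exact le_of_eq (by rw [hab'])
        · exact (List.pairwise_cons.mp h2).1 a hat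
      have hk : key a = key b := le_antisymm hab hba
      have heq : a = b := hinj a (by simp) b hb1 hk
      subst heq
      have ht : t1.Perm t2 := h.cons_inv
      have := ih t2 ht (List.pairwise_cons.mp h1).2 (List.pairwise_cons.mp h2).2
        (fun x hx y hy => hinj x (by simp [hx]) y (by simp [hy]))
      rw [this]

-- the canonical-order count expansion is a permutation of any list of pvTables members
lemma pv_flatMap_perm : ∀ (L R : List String), L.Nodup → (∀ x ∈ R, x ∈ L) →
    (L.flatMap (fun t => List.replicate (R.count t) t)).Perm R := by
  intro L
  induction L with
  | nil =>
    intro R _ hR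
    have : R = [] := by
      cases R with
      | nil => rfl
      | cons x xs => exact absurd (hR x (by simp)) (by simp)
    simp [this]
  | cons t L' ih =>
    intro R hnd hR
    have htL' : t ∉ L' := (List.nodup_cons.mp hnd).1
    rw [List.flatMap_cons]
    have hcong : L'.flatMap (fun t' => List.replicate (R.count t') t')
        = L'.flatMap (fun t' => List.replicate ((R.filter (fun x => !(x == t))).count t') t') := by
      apply List.flatMap_congr
      intro t' ht'
      have hne : t' ≠ t := fun h => htL' (h ▸ ht')
      congr 1
      rw [List.count_filter]
      simp [hne]
    rw [hcong]
    have hperm2 : (L'.flatMap (fun t' => List.replicate ((R.filter (fun x => !(x == t))).count t') t')).Perm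
        (R.filter (fun x => !(x == t))) := by
      apply ih _ (List.nodup_cons.mp hnd).2
      intro x hx
      have hx' := List.mem_filter.mp hx
      have := hR x hx'.1
      rcases List.mem_cons.mp this with h' | h'
      · exact absurd h' (by simpa using hx'.2)
      · exact h'
    have : (List.replicate (R.count t) t ++ L'.flatMap (fun t' => List.replicate ((R.filter (fun x => !(x == t))).count t') t')).Perm
        (R.filter (fun x => x == t) ++ R.filter (fun x => !(x == t))) := by
      rw [← List.filter_beq]
      exact List.Perm.append (List.Perm.refl _) hperm2
    exact this.trans (List.filter_append_perm _ R)

lemma pv_flatMap_pairwise (R : List String) :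
    (pvTables.flatMap (fun t => List.replicate (R.count t) t)).Pairwise (fun a b => pvKey a ≤ pvKey b) := by
  rw [List.pairwise_flatMap]
  constructor
  · intro a _
    exact List.pairwise_replicate.mpr (Or.inr le_rfl)
  · apply pvKey_strictMono.imp_of_mem
    intro a b _ _ hlt x hx y hy
    rw [List.eq_of_mem_replicate hx, List.eq_of_mem_replicate hy]
    exact le_of_lt hlt

-- ===== VERDICT (by name: the statement is the Claim_ definition above) =====
theorem resolve_tables_py_spec : Claim_equal_resolve_tables_py := by
  intro arg_value _ hpre
  unfold Spec_resolve_tables_py resolve_tables_py resolve_tables_py_alt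
  by_cases he : arg_value = ""
  · simp [he]
  · simp only [if_neg he]
    set raw := (PySem.Str.split? arg_value ",").getD [] with hraw
    set requested := (raw.map PySem.Str.strip).filter (fun t => t ≠ "") with hreq
    have hmem : ∀ x ∈ requested, x ∈ pvTables := by
      intro x hx
      have hx' := List.mem_filter.mp hx
      rcases hpre x hx'.1 with h | h
      · exact absurd h (by simpa using hx'.2)
      · exact h
    have hunk : requested.filter (fun t => !pvTables.contains t) = [] := by
      rw [List.filter_eq_nil_iff]
      intro x hx
      simp [hmem x hx]
    have hkn : requested.filter (fun t => pvTables.contains t) = requested := by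
      rw [List.filter_eq_self]
      intro x hx
      simp [hmem x hx]
    -- B side: the classifying fold yields (counting fold over requested, [])
    rw [pvClassify_fold raw PySem.Dict.empty []]
    rw [← hreq, hkn, hunk]
    -- both vacuous unknown checks
    simp only [List.nil_append, ne_eq, not_true_eq_false, if_false]
    -- B's output fold = canonical count expansion
    have hB : pvTables.foldl (fun out table => out ++ PySem.List.pyRepeat [table]
          ((requested.foldl (fun d t => d.insert t (d.getD t 0 + 1)) PySem.Dict.empty).getD table 0)) []
        = pvTables.flatMap (fun t => List.replicate (requested.count t) t) := by
      have hc : ∀ t, (requested.foldl (fun d t => d.insert t (d.getD t 0 + 1))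
          (PySem.Dict.empty : PySem.Dict String Int)).getD t 0 = (requested.count t : Int) := by
        intro t
        rw [PySem.Dict.foldl_insert_getD_add_one_eq_counter, PySem.Dict.getD_counter]
      have := PySem.List.foldl_congr_mem
        (f := fun out table => out ++ PySem.List.pyRepeat [table]
          ((requested.foldl (fun d t => d.insert t (d.getD t 0 + 1)) PySem.Dict.empty).getD table 0))
        (g := fun out t => out ++ List.replicate (requested.count t) t)
        (l := pvTables) (init := ([] : List String))
        (by intro acc x _; simp [hc, PySem.List.pyRepeat_singleton])
      rw [this, PySem.List.foldl_append_eq_flatMap]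
      simp
    rw [hB]
    -- A side: the stable sort by position key equals the canonical count expansion
    apply pv_eq_of_perm pvKey
    · exact (PySem.List.sorted_perm requested pvKey false).trans
        (pv_flatMap_perm pvTables requested pvTables_nodup hmem).symm
    · exact PySem.List.sorted_pairwise requested pvKey
    · exact pv_flatMap_pairwise requested
    · intro a ha b hb
      have ha' := (PySem.List.sorted_perm requested pvKey false).subset ha
      have hb' := (PySem.List.sorted_perm requested pvKey false).subset hb
      exact pvKey_inj a (hmem a ha') b (hmem b hb')
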